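-- pv_equiv track=rewrite | github.com/ThomasDebrunner/HackerRank | CaptchaCracker/main.py | find_y_bounds
-- ===== SOURCE A (Python) =====
-- def find_y_bounds(image):
--     """Returns the y bounds of the image"""
--     lower_bound = -1
--     upper_bound = -1
--     for y in range(len(image)):
--         row_empty = True
--         for pixel in image[y]:
--             if pixel < 255:
--                 row_empty = False
--                 break
--         if not row_empty and lower_bound == -1:
--             lower_bound = y
--         if row_empty and lower_bound != -1 and upper_bound == -1:
--             upper_bound = y
--
--     return lower_bound, upper_bound
-- ===== SOURCE B (Python) =====
-- def find_y_bounds(image):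
--     """Returns the y bounds of the image"""
--     lower_bound = upper_bound = first_empty = -1
--     for y in reversed(range(len(image))):
--         if any(p < 255 for p in image[y]):
--             lower_bound, upper_bound = y, first_empty
--         else:
--             first_empty = y
--     return lower_bound, upper_bound
-- ===== Notes on version B (the rewrite author's own statement) =====
-- stated objective: alternative
-- what changed: Replaced A's forward stateful scan with -1-sentinel flags by a single backward pass that carries the first-empty-row index of the suffix and builds the (lower, upper) answer back-to-front.
import Mathlib
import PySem

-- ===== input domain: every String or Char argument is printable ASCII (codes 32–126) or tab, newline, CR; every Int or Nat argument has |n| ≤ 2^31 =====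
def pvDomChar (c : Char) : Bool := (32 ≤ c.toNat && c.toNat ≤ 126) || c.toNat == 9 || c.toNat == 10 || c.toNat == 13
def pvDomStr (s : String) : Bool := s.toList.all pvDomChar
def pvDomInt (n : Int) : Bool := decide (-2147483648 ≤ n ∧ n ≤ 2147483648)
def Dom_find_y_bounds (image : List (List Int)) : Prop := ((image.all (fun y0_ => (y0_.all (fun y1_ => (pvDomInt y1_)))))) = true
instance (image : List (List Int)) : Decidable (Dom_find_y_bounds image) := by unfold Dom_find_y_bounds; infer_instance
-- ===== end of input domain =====

-- B replaces A's forward stateful scan (two -1-sentinel flags) by a single backward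
-- pass carrying the first-empty-row index of the suffix (objective: alternative decomposition).


-- ===== PORT A =====
-- inner loop: row_empty = True; for pixel in row: if pixel < 255: row_empty = False; break
def rowEmptyA : List Int → Bool
  | [] => true
  | p :: rest => if p < 255 then false else rowEmptyA rest

-- the 'for y in range(len(image))' loop, carrying (y, lower_bound, upper_bound);
-- image[y] is the current row, so the range loop is recursion over the rows with the counter y
def loopA : List (List Int) → Int → Int → Int → Int × Int
  | [], _, lb, ub => (lb, ub)
  | row :: rest, y, lb, ub =>
    let rowEmpty := rowEmptyA row
    let lb' := if ¬rowEmpty = true ∧ lb = -1 then y else lb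
    let ub' := if rowEmpty = true ∧ lb' ≠ -1 ∧ ub = -1 then y else ub
    loopA rest (y + 1) lb' ub'

def find_y_bounds (image : List (List Int)) : Int × Int :=
  loopA image 0 (-1) (-1)

-- ===== PORT B =====
-- any(p < 255 for p in row)
def anyDark (row : List Int) : Bool := row.any (fun p => decide (p < 255))

-- the backward 'for y in reversed(range(len(image)))' loop: processing the suffix of rows
-- starting at index y, returning (lower_bound, upper_bound, first_empty) for that suffix
def loopB : List (List Int) → Int → Int × Int × Int
  | [], _ => (-1, -1, -1)
  | row :: rest, y =>
    let s := loopB rest (y + 1)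
    if anyDark row then (y, s.2.2, s.2.2) else (s.1, s.2.1, y)

def find_y_bounds_alt (image : List (List Int)) : Int × Int :=
  let s := loopB image 0
  (s.1, s.2.1)

-- ===== PRECONDITION & SPEC =====
def Spec_find_y_bounds (image : List (List Int)) (out : Int × Int) : Prop := out = find_y_bounds_alt image
instance (image : List (List Int)) (out : Int × Int) : Decidable (Spec_find_y_bounds image out) := by unfold Spec_find_y_bounds; infer_instance

-- ===== CLAIM =====
def Claim_equal_find_y_bounds : Prop := ∀ (image : List (List Int)), Dom_find_y_bounds image → Spec_find_y_bounds image (find_y_bounds image)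

-- ===== LEMMAS AND PROOFS =====

theorem rowEmptyA_eq_not_anyDark (row : List Int) : rowEmptyA row = !anyDark row := by
  induction row with
  | nil => rfl
  | cons p rest ih =>
    simp only [rowEmptyA, anyDark, List.any_cons] at *
    by_cases h : p < 255 <;> simp [h, ih]

-- once both bounds are set the state of A's loop is frozen
theorem loopA_frozen (rows : List (List Int)) (y lb ub : Int)
    (hlb : lb ≠ -1) (hub : ub ≠ -1) : loopA rows y lb ub = (lb, ub) := by
  induction rows generalizing y with
  | nil => rfl
  | cons row rest ih =>
    simp only [loopA]
    split_ifs with h1 h2 h3 <;> first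
      | exact ih (y + 1)
      | tauto

-- phase 2 of A (lower bound set, searching the first empty row) computes B's first_empty component
theorem loopA_phase2 (rows : List (List Int)) (y lb : Int) (hy : 0 ≤ y) (hlb : lb ≠ -1) :
    loopA rows y lb (-1) = (lb, (loopB rows y).2.2) := by
  induction rows generalizing y with
  | nil => rfl
  | cons row rest ih =>
    simp only [loopA, loopB, rowEmptyA_eq_not_anyDark]
    by_cases h : anyDark row
    · simpa [h, hlb] using ih (y + 1) (by omega)
    · have h' : anyDark row = false := by simpa using h
      simp [h', hlb, loopA_frozen rest (y + 1) lb y hlb (by omega)]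

-- phase 1 of A (nothing found yet) computes B's (lower_bound, upper_bound) components
theorem loopA_phase1 (rows : List (List Int)) (y : Int) (hy : 0 ≤ y) :
    loopA rows y (-1) (-1) = ((loopB rows y).1, (loopB rows y).2.1) := by
  induction rows generalizing y with
  | nil => rfl
  | cons row rest ih =>
    simp only [loopA, loopB, rowEmptyA_eq_not_anyDark]
    by_cases h : anyDark row
    · simpa [h] using loopA_phase2 rest (y + 1) y (by omega) (by omega)
    · have h' : anyDark row = false := by simpa using h
      simpa [h'] using ih (y + 1) (by omega)

-- ===== VERDICT =====
theorem find_y_bounds_spec : Claim_equal_find_y_bounds := by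
  intro image _
  show find_y_bounds image = find_y_bounds_alt image
  simpa [find_y_bounds, find_y_bounds_alt] using loopA_phase1 image 0 le_rfl
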